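-- pv_equiv track=rewrite | github.com/NwobiaDavid/2048-Algorithm-Comparison | expectimax_2048.py | score_heuristic
-- ===== SOURCE A (Python) =====
-- def score_heuristic(grid):
--     score = 0
--     for row in grid:
--         for val in row:
--             if val >= 4:
--                 k = 0
--                 temp_val = val
--                 while temp_val > 1:
--                     temp_val //= 2
--                     k += 1
--                 score += (k - 1) * val
--     return score
-- ===== SOURCE B (Python) =====
-- def score_heuristic(grid):
--     return sum((val.bit_length() - 2) * val
--                for row in grid for val in row if val >= 4)
-- ===== Notes on version B (the rewrite author's own statement) =====
-- stated objective: idiomatic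
-- what changed: Replaces the hand-written repeated-halving while-loop computing floor(log2(val)) with the closed form val.bit_length()-1, and the nested accumulator loops with a single sum over a generator expression.
import Mathlib
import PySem

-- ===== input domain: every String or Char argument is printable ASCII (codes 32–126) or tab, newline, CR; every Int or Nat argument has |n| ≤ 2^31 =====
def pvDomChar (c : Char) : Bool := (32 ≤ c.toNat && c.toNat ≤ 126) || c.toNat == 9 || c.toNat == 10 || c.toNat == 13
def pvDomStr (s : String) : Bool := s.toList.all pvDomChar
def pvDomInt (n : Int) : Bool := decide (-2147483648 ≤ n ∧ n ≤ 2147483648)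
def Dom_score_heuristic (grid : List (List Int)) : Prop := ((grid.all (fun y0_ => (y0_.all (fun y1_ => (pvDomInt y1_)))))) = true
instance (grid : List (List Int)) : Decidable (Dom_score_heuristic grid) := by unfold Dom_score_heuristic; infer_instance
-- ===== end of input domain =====

-- B replaces A's repeated-halving integer-log loop by the closed form bit_length()-1
-- and the nested accumulator loops by a single sum (idiomatic rewrite).

-- ===== PORT A =====
-- the `while temp_val > 1: temp_val //= 2; k += 1` loop, with k as accumulator
def pyIntLogLoop (k : Int) (t : Int) : Int :=
  if h : 1 < t then pyIntLogLoop (k + 1) (PySem.Int.floordiv t 2) else k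
termination_by t.toNat
decreasing_by
  have h2 : PySem.Int.floordiv t 2 = t / 2 := PySem.Int.floordiv_eq_ediv_of_pos (by omega)
  have h5 := Int.mul_ediv_add_emod t 2
  have h6 := Int.emod_nonneg t (by norm_num : (2:Int) ≠ 0)
  have h7 := Int.emod_lt_of_pos t (by norm_num : (0:Int) < 2)
  simp only [h2]
  omega

def score_heuristic (grid : List (List Int)) : Int :=
  grid.foldl (fun score row =>
    row.foldl (fun score val =>
      if val ≥ 4 then score + (pyIntLogLoop 0 val - 1) * val else score) score) 0

-- ===== PORT B =====
-- sum((val.bit_length() - 2) * val for row in grid for val in row if val >= 4)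
def score_heuristic_alt (grid : List (List Int)) : Int :=
  ((((grid.flatMap (fun row => row)).filter (fun val => decide (val ≥ 4))).map
      (fun val => ((PySem.Int.bitLength val : Int) - 2) * val))).sum

-- ===== PRECONDITION & SPEC =====
def Spec_score_heuristic (grid : List (List Int)) (out : Int) : Prop := out = score_heuristic_alt grid
instance (grid : List (List Int)) (out : Int) : Decidable (Spec_score_heuristic grid out) := by unfold Spec_score_heuristic; infer_instance

-- ===== CLAIM (what is proved, stated in full; the proofs are below) =====
def Claim_equal_score_heuristic : Prop := ∀ (grid : List (List Int)), Dom_score_heuristic grid → Spec_score_heuristic grid (score_heuristic grid)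

-- ===== LEMMAS AND PROOFS =====

-- A's halving loop computes k + bit_length(t) - 1 for positive t
theorem pyIntLogLoop_eq (k t : Int) (ht : 0 < t) :
    pyIntLogLoop k t = k + (PySem.Int.bitLength t : Int) - 1 := by
  revert ht
  induction k, t using pyIntLogLoop.induct with
  | case1 k t h ih =>
    intro _
    have hpos : 0 < PySem.Int.floordiv t 2 := by
      rw [PySem.Int.floordiv_eq_ediv_of_pos (by omega)]
      have h5 := Int.mul_ediv_add_emod t 2
      have h7 := Int.emod_lt_of_pos t (by norm_num : (0:Int) < 2)
      omega
    rw [pyIntLogLoop, dif_pos h, ih hpos,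
      PySem.Int.bitLength_of_pos (by omega : (0:Int) < t)]
    push_cast
    omega
  | case2 k t h =>
    intro ht
    rw [pyIntLogLoop, dif_neg h]
    have ht1 : t = 1 := by omega
    subst ht1
    have h1 : PySem.Int.bitLength 1 = 1 := by decide
    rw [h1]; omega

theorem row_foldl (g : Int → Int) (row : List Int) :
    ∀ s : Int,
      row.foldl (fun score val => if val ≥ 4 then score + g val else score) s
        = s + (((row.filter (fun val => decide (val ≥ 4))).map g)).sum := by
  induction row with
  | nil => intro s; simp
  | cons v vs ih =>
    intro s
    by_cases hv : v ≥ 4 <;> simp [List.foldl_cons, hv, ih] <;> try omega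

theorem grid_foldl (g : Int → Int) (grid : List (List Int)) :
    ∀ s : Int,
      grid.foldl (fun score row =>
          row.foldl (fun score val => if val ≥ 4 then score + g val else score) score) s
        = s + ((((grid.flatMap (fun row => row)).filter (fun val => decide (val ≥ 4))).map g)).sum := by
  induction grid with
  | nil => intro s; simp
  | cons r rs ih =>
    intro s
    rw [List.foldl_cons, ih, row_foldl]
    simp only [List.flatMap_cons, List.filter_append, List.map_append, List.sum_append]
    ring

-- ===== VERDICT (by name: the statement is the Claim_ definition above) =====
theorem score_heuristic_spec : Claim_equal_score_heuristic := by
  intro grid _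
  unfold Spec_score_heuristic score_heuristic score_heuristic_alt
  rw [grid_foldl]
  have hmap : ((grid.flatMap (fun row => row)).filter (fun val => decide (val ≥ 4))).map
        (fun val => (pyIntLogLoop 0 val - 1) * val)
      = ((grid.flatMap (fun row => row)).filter (fun val => decide (val ≥ 4))).map
        (fun val => ((PySem.Int.bitLength val : Int) - 2) * val) := by
    apply List.map_congr_left
    intro v hv
    have h4 : v ≥ 4 := by simpa using (List.of_mem_filter hv)
    rw [pyIntLogLoop_eq 0 v (by omega)]
    ring
  rw [hmap, Int.zero_add]
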